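-- pv_equiv track=rewrite | github.com/Emerge-Lab/PufferDrive | pufferlib/ocean/benchmark/trajectory_approximation/trajectory_utils.py | find_valid_segments
-- ===== SOURCE A (Python) =====
-- def find_valid_segments(valid_mask, min_length=10):
--     """
--     Extract continuous valid segments from trajectory.
--
--     Args:
--         valid_mask: Boolean array indicating valid timesteps
--         min_length: Minimum segment length to consider
--     Returns:
--         List of (start_idx, end_idx) tuples
--     """
--     segments = []
--     in_segment = False
--     start = 0
--
--     for i, is_valid in enumerate(valid_mask):
--         if is_valid and not in_segment:
--             start = i
--             in_segment = True
--         elif not is_valid and in_segment: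
--             if i - start >= min_length:
--                 segments.append((start, i))
--             in_segment = False
--
--     # Handle segment at end
--     if in_segment and len(valid_mask) - start >= min_length:
--         segments.append((start, len(valid_mask)))
--
--     return segments
-- ===== SOURCE B (Python) =====
-- from itertools import groupby
--
-- def find_valid_segments(valid_mask, min_length=10):
--     segments = []
--     idx = 0
--     for key, grp in groupby(valid_mask, key=bool):
--         n = sum(1 for _ in grp)
--         if key and n >= min_length:
--             segments.append((idx, idx + n))
--         idx += n
--     return segments
-- ===== Notes on version B (the rewrite author's own statement) =====
-- stated objective: idiomatic
-- what changed: Replaces the stateful in_segment flag machine with its elif transition and trailing special-case by a uniform itertools.groupby run-length pass that filters qualifying True runs.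
import Mathlib
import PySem

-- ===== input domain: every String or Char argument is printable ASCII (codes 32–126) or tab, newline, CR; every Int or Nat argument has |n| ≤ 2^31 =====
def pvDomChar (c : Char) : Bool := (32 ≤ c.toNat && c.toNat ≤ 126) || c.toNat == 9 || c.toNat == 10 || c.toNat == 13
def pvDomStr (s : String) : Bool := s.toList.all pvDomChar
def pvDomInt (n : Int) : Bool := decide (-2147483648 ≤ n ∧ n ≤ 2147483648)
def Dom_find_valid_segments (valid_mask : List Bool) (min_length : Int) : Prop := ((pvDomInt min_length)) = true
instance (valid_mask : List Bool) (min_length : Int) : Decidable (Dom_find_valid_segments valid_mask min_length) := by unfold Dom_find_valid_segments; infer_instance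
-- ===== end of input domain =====

-- B replaces A's stateful in_segment flag machine (with its elif transition and
-- trailing special case) by a uniform groupby run-length pass; same O(n) cost.


-- ===== PORT A =====
-- A's for-loop over enumerate(valid_mask) with state (segments, in_segment, start)
def fvsLoopA (min_length : Int) : List Bool → Int → List (Int × Int) → Bool → Int → List (Int × Int) × Bool × Int
  | [], _, segments, in_segment, start => (segments, in_segment, start)
  | is_valid :: rest, i, segments, in_segment, start =>
    if is_valid && !in_segment then
      fvsLoopA min_length rest (i + 1) segments true i
    else if !is_valid && in_segment then
      fvsLoopA min_length rest (i + 1)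
        (if i - start ≥ min_length then segments ++ [(start, i)] else segments) false start
    else
      fvsLoopA min_length rest (i + 1) segments in_segment start

def find_valid_segments (valid_mask : List Bool) (min_length : Int) : List (Int × Int) :=
  match fvsLoopA min_length valid_mask 0 [] false 0 with
  | (segments, in_segment, start) =>
    if in_segment && decide ((valid_mask.length : Int) - start ≥ min_length) then
      segments ++ [(start, (valid_mask.length : Int))]
    else segments

-- ===== PORT B =====
-- itertools.groupby: split the mask into maximal runs (key, run_length)
def fvsRuns : List Bool → List (Bool × Nat)
  | [] => []
  | b :: rest =>
    (b, (rest.takeWhile (· == b)).length + 1) :: fvsRuns (rest.dropWhile (· == b))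
  termination_by l => l.length
  decreasing_by
    simpa using Nat.lt_succ_of_le (List.length_dropWhile_le _ _)

-- B's for-loop over the groups, threading the running index
def fvsLoopB (min_length : Int) : List (Bool × Nat) → Int → List (Int × Int) → List (Int × Int)
  | [], _, segs => segs
  | (k, n) :: t, idx, segs =>
    fvsLoopB min_length t (idx + (n : Int))
      (if k && decide ((n : Int) ≥ min_length) then segs ++ [(idx, idx + (n : Int))] else segs)

def find_valid_segments_alt (valid_mask : List Bool) (min_length : Int) : List (Int × Int) :=
  fvsLoopB min_length (fvsRuns valid_mask) 0 []

-- ===== PRECONDITION & SPEC =====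
def Spec_find_valid_segments (valid_mask : List Bool) (min_length : Int) (out : List (Int × Int)) : Prop := out = find_valid_segments_alt valid_mask min_length
instance (valid_mask : List Bool) (min_length : Int) (out : List (Int × Int)) : Decidable (Spec_find_valid_segments valid_mask min_length out) := by unfold Spec_find_valid_segments; infer_instance

-- ===== CLAIM (what is proved, stated in full; the proofs are below) =====
def Claim_equal_find_valid_segments : Prop := ∀ (valid_mask : List Bool) (min_length : Int), Dom_find_valid_segments valid_mask min_length → Spec_find_valid_segments valid_mask min_length (find_valid_segments valid_mask min_length)

-- ===== LEMMAS AND PROOFS =====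

-- A's trailing "segment at end" check, as a function of the final loop state
def fvsFinish (min_length : Int) (st : List (Int × Int) × Bool × Int) (N : Int) : List (Int × Int) :=
  if st.2.1 && decide (N - st.2.2 ≥ min_length) then st.1 ++ [(st.2.2, N)] else st.1

lemma find_eq_finish (valid_mask : List Bool) (min_length : Int) :
    find_valid_segments valid_mask min_length =
      fvsFinish min_length (fvsLoopA min_length valid_mask 0 [] false 0) (valid_mask.length : Int) := by
  unfold find_valid_segments fvsFinish
  rcases fvsLoopA min_length valid_mask 0 [] false 0 with ⟨segs, ins, st⟩
  rfl

lemma takeWhile_eq_replicate (b : Bool) : ∀ l : List Bool,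
    l.takeWhile (· == b) = List.replicate (l.takeWhile (· == b)).length b := by
  intro l
  induction l with
  | nil => rfl
  | cons x xs ih =>
    by_cases hx : x = b
    · subst hx; simp [List.replicate_succ] at *; exact ih
    · simp [hx]

lemma head_dropWhile (b : Bool) : ∀ (l : List Bool) (x : Bool) (xs : List Bool),
    l.dropWhile (· == b) = x :: xs → x ≠ b := by
  intro l
  induction l with
  | nil => intro x xs h; simp at h
  | cons y ys ih =>
    intro x xs h
    by_cases hy : y = b
    · subst hy; simp at h; exact ih _ _ h
    · simp [hy] at h; rw [← h.1]; exact hy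

lemma loopA_false_run (ml : Int) (m : Nat) : ∀ (rest : List Bool) (i : Int) segs (start : Int),
    fvsLoopA ml (List.replicate m false ++ rest) i segs false start
      = fvsLoopA ml rest (i + (m : Int)) segs false start := by
  induction m with
  | zero => intro rest i segs start; simp
  | succ k ih =>
    intro rest i segs start
    rw [List.replicate_succ, List.cons_append]
    show fvsLoopA ml (List.replicate k false ++ rest) (i + 1) segs false start = _
    rw [ih]
    congr 1
    push_cast; ring

lemma loopA_true_run (ml : Int) (m : Nat) : ∀ (rest : List Bool) (i : Int) segs (start : Int),
    fvsLoopA ml (List.replicate m true ++ rest) i segs true start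
      = fvsLoopA ml rest (i + (m : Int)) segs true start := by
  induction m with
  | zero => intro rest i segs start; simp
  | succ k ih =>
    intro rest i segs start
    rw [List.replicate_succ, List.cons_append]
    show fvsLoopA ml (List.replicate k true ++ rest) (i + 1) segs true start = _
    rw [ih]
    congr 1
    push_cast; ring

-- Decompose a cons mask into its leading run and remainder, with B's group head
lemma runs_decomp (b : Bool) (tl : List Bool) :
    ∃ (m : Nat) (dw : List Bool), tl = List.replicate m b ++ dw ∧
      fvsRuns (b :: tl) = (b, m + 1) :: fvsRuns dw ∧
      (∀ x xs, dw = x :: xs → x ≠ b) := by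
  refine ⟨(tl.takeWhile (· == b)).length, tl.dropWhile (· == b), ?_, by simp [fvsRuns], ?_⟩
  · conv_lhs => rw [← List.takeWhile_append_dropWhile (p := (· == b)) (l := tl)]
    rw [← takeWhile_eq_replicate b tl]
  · intro x xs h; exact head_dropWhile b tl x xs h

-- Main invariant: from a not-in-segment state, A's loop (plus the trailing
-- check at absolute end i + |mask|) agrees with B's group loop.
theorem loop_equiv (ml : Int) (mask : List Bool) :
    ∀ (i : Int) (segs : List (Int × Int)) (start : Int),
      fvsFinish ml (fvsLoopA ml mask i segs false start) (i + (mask.length : Int))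
        = fvsLoopB ml (fvsRuns mask) i segs := by
  match mask with
  | [] =>
    intro i segs start
    simp [fvsLoopA, fvsLoopB, fvsFinish, fvsRuns]
  | b :: tl =>
    intro i segs start
    obtain ⟨m, dw, htl, hrun, hhd⟩ := runs_decomp b tl
    subst htl
    rw [hrun]
    cases b with
    | false =>
      rw [show fvsLoopA ml (false :: (List.replicate m false ++ dw)) i segs false start
            = fvsLoopA ml (List.replicate m false ++ dw) (i + 1) segs false start from rfl]
      rw [loopA_false_run]
      rw [show fvsLoopB ml ((false, m + 1) :: fvsRuns dw) i segs
            = fvsLoopB ml (fvsRuns dw) (i + ((m + 1 : Nat) : Int)) segs from by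
        simp [fvsLoopB]]
      have hN : i + (((false :: (List.replicate m false ++ dw)).length : Nat) : Int)
          = (i + 1 + (m : Int)) + ((dw.length : Nat) : Int) := by
        simp; ring
      have hI : i + ((m + 1 : Nat) : Int) = i + 1 + (m : Int) := by push_cast; ring
      rw [hN, hI]
      exact loop_equiv ml dw (i + 1 + (m : Int)) segs start
    | true =>
      rw [show fvsLoopA ml (true :: (List.replicate m true ++ dw)) i segs false start
            = fvsLoopA ml (List.replicate m true ++ dw) (i + 1) segs true i from rfl]
      rw [loopA_true_run]
      cases hdw : dw with
      | nil =>
        subst hdw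
        have hN : i + (((true :: (List.replicate m true ++ ([] : List Bool))).length : Nat) : Int)
            = i + ((m + 1 : Nat) : Int) := by
          push_cast [List.length_cons, List.length_append, List.length_replicate, List.length_nil]; ring
        rw [hN]
        show fvsFinish ml (segs, true, i) (i + ((m + 1 : Nat) : Int)) = _
        simp only [fvsFinish, fvsRuns, fvsLoopB, Bool.true_and]
        rw [show i + ((m + 1 : Nat) : Int) - i = ((m + 1 : Nat) : Int) from by ring]
      | cons x dw2 =>
        have hx : x = false := by
          cases x
          · rfl
          · exact absurd rfl (hhd _ _ hdw)
        subst hx; subst hdw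
        rw [show fvsLoopA ml (false :: dw2) (i + 1 + (m : Int)) segs true i
              = fvsLoopA ml dw2 (i + 1 + (m : Int) + 1)
                  (if (i + 1 + (m : Int)) - i ≥ ml then
                     segs ++ [(i, i + 1 + (m : Int))] else segs) false i from rfl]
        obtain ⟨m2, dw3, htl2, hrun2, _⟩ := runs_decomp false dw2
        subst htl2
        rw [loopA_false_run, hrun2]
        have hsegs : (if (i + 1 + (m : Int)) - i ≥ ml then
              segs ++ [(i, i + 1 + (m : Int))] else segs)
            = (if true && decide (((m + 1 : Nat) : Int) ≥ ml) then
                 segs ++ [(i, i + ((m + 1 : Nat) : Int))] else segs) := by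
          simp only [Bool.true_and, decide_eq_true_eq]
          rw [show (i + 1 + (m : Int)) - i = ((m + 1 : Nat) : Int) from by push_cast; ring]
          split_ifs with h
          · rw [show i + 1 + (m : Int) = i + ((m + 1 : Nat) : Int) from by push_cast; ring]
          · rfl
        rw [show fvsLoopB ml ((true, m + 1) :: (false, m2 + 1) :: fvsRuns dw3) i segs
              = fvsLoopB ml (fvsRuns dw3) (i + ((m + 1 : Nat) : Int) + ((m2 + 1 : Nat) : Int))
                  (if true && decide (((m + 1 : Nat) : Int) ≥ ml) then
                     segs ++ [(i, i + ((m + 1 : Nat) : Int))] else segs) from by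
          simp [fvsLoopB]]
        rw [← hsegs]
        have hN : i + (((true :: (List.replicate m true ++
              false :: (List.replicate m2 false ++ dw3))).length : Nat) : Int)
            = (i + 1 + (m : Int) + 1 + (m2 : Int)) + ((dw3.length : Nat) : Int) := by
          simp; ring
        have hI : i + ((m + 1 : Nat) : Int) + ((m2 + 1 : Nat) : Int)
            = i + 1 + (m : Int) + 1 + (m2 : Int) := by push_cast; ring
        rw [hN, hI]
        exact loop_equiv ml dw3 (i + 1 + (m : Int) + 1 + (m2 : Int))
            (if (i + 1 + (m : Int)) - i ≥ ml then
               segs ++ [(i, i + 1 + (m : Int))] else segs) i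
termination_by mask.length
decreasing_by
  · simp [htl]; try omega
  · simp [htl, hdw, htl2]; omega

-- ===== VERDICT (by name: the statement is the Claim_ definition above) =====
theorem find_valid_segments_spec : Claim_equal_find_valid_segments := by
  intro valid_mask min_length _
  unfold Spec_find_valid_segments find_valid_segments_alt
  rw [find_eq_finish]
  have := loop_equiv min_length valid_mask 0 [] 0
  simpa using this
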